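-- pv_equiv track=rewrite | github.com/thiagofinch/mega-brain | core/intelligence/pipeline/mce/log_generator.py | _metric_grid
-- ===== SOURCE A (Python) =====
-- W = 120  # Full width
--
-- def _pad(text: str, width: int, pad_char: str = " ") -> str:
--     """Pad text to exact width, truncating if needed."""
--     if len(text) >= width:
--         return text[:width]
--     return text + pad_char * (width - len(text))
--
-- def _metric_grid(metrics: list[tuple[str, str, str]]) -> list[str]:
--     """Chronicler metric_grid: list of (value, label, explanation)."""
--     # Calculate card width based on number of metrics (max 4 per row)
--     per_row = min(len(metrics), 4)
--     card_w = 24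
--     total_inner = per_row * (card_w + 3) + 1
--     grid_w = min(total_inner + 6, W - 4)
--
--     lines = [
--         f"╭{'─' * (W - 2)}╮",
--         f"│{_pad('                                    📊 PAINEL DE METRICAS', W - 2)}│",
--         f"│{_pad('', W - 2)}│",
--     ]
--
--     # Build card rows
--     for row_start in range(0, len(metrics), 4):
--         row = metrics[row_start:row_start + 4]
--         # Top borders
--         card_tops = "   ".join(f"┌{'─' * card_w}┐" for _ in row)
--         lines.append(f"│   {_pad(card_tops, W - 5)}│")
--         # Values
--         card_vals = "   ".join(f"│{_pad(m[0], card_w, ' ').center(card_w)}│" for m in row)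
--         lines.append(f"│   {_pad(card_vals, W - 5)}│")
--         # Labels
--         card_lbls = "   ".join(f"│{_pad(m[1], card_w, ' ').center(card_w)}│" for m in row)
--         lines.append(f"│   {_pad(card_lbls, W - 5)}│")
--         # Explanations
--         card_exps = "   ".join(f"│{_pad('[' + m[2] + ']', card_w, ' ').center(card_w)}│" for m in row)
--         lines.append(f"│   {_pad(card_exps, W - 5)}│")
--         # Bottom borders
--         card_bots = "   ".join(f"└{'─' * card_w}┘" for _ in row)
--         lines.append(f"│   {_pad(card_bots, W - 5)}│")
--
--     lines.append(f"│{_pad('', W - 2)}│")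
--     lines.append(f"╰{'─' * (W - 2)}╯")
--     return lines
-- ===== SOURCE B (Python) =====
-- W = 120  # Full width
-- CARD_W = 24
--
--
-- def _pad(text: str, width: int, pad_char: str = " ") -> str:
--     """Pad text to exact width, truncating if needed."""
--     if len(text) >= width:
--         return text[:width]
--     return text + pad_char * (width - len(text))
--
--
-- def _card(m: tuple) -> list:
--     """Render one metric as the 5 lines of its card box."""
--     value, label, expl = m
--     return [
--         "┌" + "─" * CARD_W + "┐",
--         "│" + _pad(value, CARD_W) + "│",
--         "│" + _pad(label, CARD_W) + "│",
--         "│" + _pad("[" + expl + "]", CARD_W) + "│",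
--         "└" + "─" * CARD_W + "┘",
--     ]
--
--
-- def _metric_grid(metrics: list) -> list:
--     """Chronicler metric_grid: list of (value, label, explanation)."""
--     lines = [
--         "╭" + "─" * (W - 2) + "╮",
--         "│" + _pad("                                    📊 PAINEL DE METRICAS", W - 2) + "│",
--         "│" + _pad("", W - 2) + "│",
--     ]
--     rest = metrics
--     while rest:
--         chunk, rest = rest[:4], rest[4:]
--         cards = [_card(m) for m in chunk]
--         for i in range(5):
--             line = "   ".join(card[i] for card in cards)
--             lines.append("│   " + _pad(line, W - 5) + "│")
--     lines.append("│" + _pad("", W - 2) + "│")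
--     lines.append("╰" + "─" * (W - 2) + "╯")
--     return lines
-- ===== Notes on version B (the rewrite author's own statement) =====
-- stated objective: simpler
-- what changed: Replaces the five inline per-row join expressions (with the no-op .center pass) by a per-metric card renderer returning the 5 lines of one box, a transpose-style join of the cards' i-th lines, and take/drop while-loop chunking instead of an index range loop with slicing; the unused per_row/total_inner/grid_w locals are dropped.
import Mathlib
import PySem

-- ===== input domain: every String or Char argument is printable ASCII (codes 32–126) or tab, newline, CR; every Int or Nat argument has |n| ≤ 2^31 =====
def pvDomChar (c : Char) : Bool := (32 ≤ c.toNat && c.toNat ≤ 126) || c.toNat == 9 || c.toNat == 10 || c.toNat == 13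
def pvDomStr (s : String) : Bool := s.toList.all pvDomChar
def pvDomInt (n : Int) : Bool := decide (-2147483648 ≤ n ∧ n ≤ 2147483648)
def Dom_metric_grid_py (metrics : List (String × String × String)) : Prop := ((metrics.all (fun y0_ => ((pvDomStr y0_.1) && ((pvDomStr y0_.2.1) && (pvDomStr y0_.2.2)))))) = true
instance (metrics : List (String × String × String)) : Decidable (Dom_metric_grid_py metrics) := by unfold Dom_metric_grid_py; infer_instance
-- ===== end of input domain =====

-- B replaces A's five inline per-row joins (and the no-op .center pass) by a per-metric
-- card renderer plus a transpose of the cards' lines, with take/drop chunking; same output.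

-- Python `s * n` for a string (n ≤ 0 gives ""): exact.
def pvStrMul (s : String) (n : Int) : String :=
  String.ofList ((List.replicate n.toNat s.toList).flatten)

-- _pad, module helper shared by both versions (literal transliteration).
def pad_py (text : String) (width : Int) (pad_char : String) : String :=
  if width ≤ PySem.Str.len text then PySem.Str.slice text none (some width)
  else text ++ pvStrMul pad_char (width - PySem.Str.len text)

-- hand-port of CPython str.center (fill ' '): left margin = marg//2 + (marg & width & 1); exact.
def pvCenter (s : String) (width : Int) : String :=
  let marg := width - PySem.Str.len s
  if marg ≤ 0 then s
  else
    let left := PySem.Int.floordiv marg 2 + (if marg % 2 == 1 && width % 2 == 1 then 1 else 0)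
    pvStrMul " " left ++ s ++ pvStrMul " " (marg - left)

-- ===== PORT A =====
def metric_grid_py (metrics : List (String × String × String)) : List String :=
  let per_row := min (PySem.List.len metrics) 4
  let card_w : Int := 24
  let total_inner := per_row * (card_w + 3) + 1
  let _grid_w := min (total_inner + 6) (120 - 4)
  let lines : List String := [
    "╭" ++ pvStrMul "─" (120 - 2) ++ "╮",
    "│" ++ pad_py "                                    📊 PAINEL DE METRICAS" (120 - 2) " " ++ "│",
    "│" ++ pad_py "" (120 - 2) " " ++ "│"]
  let lines := (PySem.List.pyRange 0 (PySem.List.len metrics) 4).foldl (fun lines row_start =>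
    let row := PySem.List.slice metrics (some row_start) (some (row_start + 4))
    let card_tops := PySem.Str.join "   " (row.map (fun _ => "┌" ++ pvStrMul "─" card_w ++ "┐"))
    let lines := lines ++ ["│   " ++ pad_py card_tops (120 - 5) " " ++ "│"]
    let card_vals := PySem.Str.join "   " (row.map (fun m => "│" ++ pvCenter (pad_py m.1 card_w " ") card_w ++ "│"))
    let lines := lines ++ ["│   " ++ pad_py card_vals (120 - 5) " " ++ "│"]
    let card_lbls := PySem.Str.join "   " (row.map (fun m => "│" ++ pvCenter (pad_py m.2.1 card_w " ") card_w ++ "│"))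
    let lines := lines ++ ["│   " ++ pad_py card_lbls (120 - 5) " " ++ "│"]
    let card_exps := PySem.Str.join "   " (row.map (fun m => "│" ++ pvCenter (pad_py ("[" ++ m.2.2 ++ "]") card_w " ") card_w ++ "│"))
    let lines := lines ++ ["│   " ++ pad_py card_exps (120 - 5) " " ++ "│"]
    let card_bots := PySem.Str.join "   " (row.map (fun _ => "└" ++ pvStrMul "─" card_w ++ "┘"))
    lines ++ ["│   " ++ pad_py card_bots (120 - 5) " " ++ "│"]) lines
  lines ++ ["│" ++ pad_py "" (120 - 2) " " ++ "│", "╰" ++ pvStrMul "─" (120 - 2) ++ "╯"]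

-- ===== PORT B =====
def pvCard (m : String × String × String) : List String :=
  ["┌" ++ pvStrMul "─" 24 ++ "┐",
   "│" ++ pad_py m.1 24 " " ++ "│",
   "│" ++ pad_py m.2.1 24 " " ++ "│",
   "│" ++ pad_py ("[" ++ m.2.2 ++ "]") 24 " " ++ "│",
   "└" ++ pvStrMul "─" 24 ++ "┘"]

-- card[i] with i ∈ range(5) is always in range (cards have 5 lines); the .getD "" default is unreachable.
def pvBoxRow (chunk : List (String × String × String)) : List String :=
  let cards := chunk.map pvCard
  (PySem.List.pyRange 0 5 1).map (fun i =>
    "│   " ++ pad_py (PySem.Str.join "   " (cards.map (fun card => (PySem.List.pyGet? card i).getD ""))) (120 - 5) " " ++ "│")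

def pvChunks : List (String × String × String) → List String
  | [] => []
  | m :: rest => pvBoxRow ((m :: rest).take 4) ++ pvChunks ((m :: rest).drop 4)
termination_by l => l.length
decreasing_by simp

def metric_grid_py_alt (metrics : List (String × String × String)) : List String :=
  ["╭" ++ pvStrMul "─" (120 - 2) ++ "╮",
   "│" ++ pad_py "                                    📊 PAINEL DE METRICAS" (120 - 2) " " ++ "│",
   "│" ++ pad_py "" (120 - 2) " " ++ "│"]
  ++ pvChunks metrics
  ++ ["│" ++ pad_py "" (120 - 2) " " ++ "│", "╰" ++ pvStrMul "─" (120 - 2) ++ "╯"]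

-- ===== PRECONDITION & SPEC =====
def Spec_metric_grid_py (metrics : List (String × String × String)) (out : List String) : Prop := out = metric_grid_py_alt metrics
instance (metrics : List (String × String × String)) (out : List String) : Decidable (Spec_metric_grid_py metrics out) := by unfold Spec_metric_grid_py; infer_instance

-- ===== CLAIM (what is proved, stated in full; the proofs are below) =====
def Claim_equal_metric_grid_py : Prop := ∀ (metrics : List (String × String × String)), Dom_metric_grid_py metrics → Spec_metric_grid_py metrics (metric_grid_py metrics)

-- ===== LEMMAS AND PROOFS =====

theorem pvStrMul_toList (s : String) (n : Int) :
    (pvStrMul s n).toList = (List.replicate n.toNat s.toList).flatten := by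
  simp [pvStrMul]

theorem pad_py_len (s : String) (w : Int) (hw : 0 ≤ w) :
    PySem.Str.len (pad_py s w " ") = w := by
  simp only [pad_py]
  split_ifs with h
  · rw [PySem.Str.len_eq] at h ⊢
    rw [PySem.Str.toList_slice]
    have hs : s.toList.length = s.length := by simp
    simp [PySem.Chars.slice_eq_listSlice, PySem.List.slice_to _ hw]
    omega
  · rw [PySem.Str.len_eq] at h ⊢
    have hs : s.toList.length = s.length := by simp
    simp [pvStrMul_toList]
    omega

theorem pvCenter_of_len (s : String) (w : Int) (h : PySem.Str.len s = w) :
    pvCenter s w = s := by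
  unfold pvCenter
  rw [h]
  simp

theorem pvCenter_pad (s : String) : pvCenter (pad_py s 24 " ") 24 = pad_py s 24 " " :=
  pvCenter_of_len _ _ (pad_py_len s 24 (by norm_num))

theorem pyRange4_nil (a b : Int) (h : b ≤ a) : PySem.List.pyRange a b 4 = [] := by
  rw [PySem.List.pyRange_of_pos a b (by norm_num)]
  simp [show ¬ a < b by omega]

theorem pyRange4_cons (a b : Int) (h : a < b) :
    PySem.List.pyRange a b 4 = a :: PySem.List.pyRange (a + 4) b 4 := by
  rw [PySem.List.pyRange_of_pos a b (by norm_num),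
      PySem.List.pyRange_of_pos (a + 4) b (by norm_num)]
  have hn : ((b - a + 4 - 1) / 4).toNat
      = (if a + 4 < b then ((b - (a + 4) + 4 - 1) / 4).toNat else 0) + 1 := by
    split_ifs <;> omega
  rw [if_pos h, hn, List.range_succ_eq_map]
  simp only [List.map_cons, List.map_map]
  refine List.cons_eq_cons.mpr ⟨by norm_num, ?_⟩
  refine List.map_congr_left ?_
  intro k _
  simp [Function.comp]
  ring

theorem pvCard_get0 (m : String × String × String) :
    (PySem.List.pyGet? (pvCard m) 0).getD "" = "┌" ++ pvStrMul "─" 24 ++ "┐" := by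
  simp [pvCard, PySem.List.pyGet?, PySem.List.pyIdx?]

theorem pvCard_get1 (m : String × String × String) :
    (PySem.List.pyGet? (pvCard m) 1).getD "" = "│" ++ pad_py m.1 24 " " ++ "│" := by
  simp [pvCard, PySem.List.pyGet?, PySem.List.pyIdx?]

theorem pvCard_get2 (m : String × String × String) :
    (PySem.List.pyGet? (pvCard m) 2).getD "" = "│" ++ pad_py m.2.1 24 " " ++ "│" := by
  simp [pvCard, PySem.List.pyGet?, PySem.List.pyIdx?]

theorem pvCard_get3 (m : String × String × String) :
    (PySem.List.pyGet? (pvCard m) 3).getD "" = "│" ++ pad_py ("[" ++ m.2.2 ++ "]") 24 " " ++ "│" := by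
  simp [pvCard, PySem.List.pyGet?, PySem.List.pyIdx?]

theorem pvCard_get4 (m : String × String × String) :
    (PySem.List.pyGet? (pvCard m) 4).getD "" = "└" ++ pvStrMul "─" 24 ++ "┘" := by
  simp [pvCard, PySem.List.pyGet?, PySem.List.pyIdx?]

-- A's five per-row lines equal B's transposed card lines, for any row.
theorem row_eq (row : List (String × String × String)) :
    ["│   " ++ pad_py (PySem.Str.join "   " (row.map (fun _ => "┌" ++ pvStrMul "─" 24 ++ "┐"))) (120 - 5) " " ++ "│",
     "│   " ++ pad_py (PySem.Str.join "   " (row.map (fun m => "│" ++ pvCenter (pad_py m.1 24 " ") 24 ++ "│"))) (120 - 5) " " ++ "│",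
     "│   " ++ pad_py (PySem.Str.join "   " (row.map (fun m => "│" ++ pvCenter (pad_py m.2.1 24 " ") 24 ++ "│"))) (120 - 5) " " ++ "│",
     "│   " ++ pad_py (PySem.Str.join "   " (row.map (fun m => "│" ++ pvCenter (pad_py ("[" ++ m.2.2 ++ "]") 24 " ") 24 ++ "│"))) (120 - 5) " " ++ "│",
     "│   " ++ pad_py (PySem.Str.join "   " (row.map (fun _ => "└" ++ pvStrMul "─" 24 ++ "┘"))) (120 - 5) " " ++ "│"]
    = pvBoxRow row := by
  have h5 : PySem.List.pyRange 0 5 1 = [0, 1, 2, 3, 4] := by decide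
  simp only [pvBoxRow, h5, List.map_cons, List.map_nil, List.map_map, Function.comp_def,
    pvCard_get0, pvCard_get1, pvCard_get2, pvCard_get3, pvCard_get4, pvCenter_pad]

-- the chunk loop: A's range(0, len, 4) fold with slicing = B's take/drop recursion.
theorem fold_chunks (ms : List (String × String × String)) (n : Nat) :
    ∀ (j : Nat) (acc : List String), ms.length - j ≤ n →
    (PySem.List.pyRange (j : Int) (ms.length : Int) 4).foldl (fun lines row_start =>
      lines ++ (pvBoxRow (PySem.List.slice ms (some row_start) (some (row_start + 4))))) acc
    = acc ++ pvChunks (ms.drop j) := by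
  induction n with
  | zero =>
    intro j acc hj
    have hge : ms.length ≤ j := by omega
    rw [pyRange4_nil _ _ (by exact_mod_cast hge)]
    simp [List.drop_eq_nil_of_le hge, pvChunks]
  | succ n ih =>
    intro j acc hj
    by_cases hlt : j < ms.length
    · rw [pyRange4_cons _ _ (by exact_mod_cast hlt)]
      simp only [List.foldl_cons]
      have hsl : PySem.List.slice ms (some (j : Int)) (some ((j : Int) + 4))
          = (ms.drop j).take 4 := by
        have := PySem.List.slice_natCast_add ms j 4
        simpa using this
      have hcast : ((j : Int) + 4) = ((j + 4 : Nat) : Int) := by push_cast; ring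
      rw [hsl, hcast, ih (j + 4) _ (by omega)]
      obtain ⟨m, rest, hdrop⟩ : ∃ m rest, ms.drop j = m :: rest := by
        rcases h : ms.drop j with _ | ⟨m, rest⟩
        · exfalso; have := List.drop_eq_nil_iff.mp h; omega
        · exact ⟨m, rest, rfl⟩
      rw [hdrop]
      show (acc ++ pvBoxRow ((m :: rest).take 4)) ++ pvChunks (ms.drop (j + 4))
          = acc ++ pvChunks (m :: rest)
      have hdd : ms.drop (j + 4) = (m :: rest).drop 4 := by
        rw [← hdrop, List.drop_drop]
      rw [hdd, List.append_assoc]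
      rw [pvChunks]
    · have hge : ms.length ≤ j := by omega
      rw [pyRange4_nil _ _ (by exact_mod_cast hge)]
      simp [List.drop_eq_nil_of_le hge, pvChunks]

-- ===== VERDICT (by name: the statement is the Claim_ definition above) =====
theorem metric_grid_py_spec : Claim_equal_metric_grid_py := by
  intro metrics _
  show metric_grid_py metrics = metric_grid_py_alt metrics
  simp only [metric_grid_py, metric_grid_py_alt]
  have hbody : (fun (lines : List String) (row_start : Int) =>
      lines ++ pvBoxRow (PySem.List.slice metrics (some row_start) (some (row_start + 4))))
      = (fun lines row_start =>
      let row := PySem.List.slice metrics (some row_start) (some (row_start + 4))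
      ((((lines
        ++ ["│   " ++ pad_py (PySem.Str.join "   " (row.map (fun _ => "┌" ++ pvStrMul "─" 24 ++ "┐"))) (120 - 5) " " ++ "│"])
        ++ ["│   " ++ pad_py (PySem.Str.join "   " (row.map (fun m => "│" ++ pvCenter (pad_py m.1 24 " ") 24 ++ "│"))) (120 - 5) " " ++ "│"])
        ++ ["│   " ++ pad_py (PySem.Str.join "   " (row.map (fun m => "│" ++ pvCenter (pad_py m.2.1 24 " ") 24 ++ "│"))) (120 - 5) " " ++ "│"])
        ++ ["│   " ++ pad_py (PySem.Str.join "   " (row.map (fun m => "│" ++ pvCenter (pad_py ("[" ++ m.2.2 ++ "]") 24 " ") 24 ++ "│"))) (120 - 5) " " ++ "│"])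
        ++ ["│   " ++ pad_py (PySem.Str.join "   " (row.map (fun _ => "└" ++ pvStrMul "─" 24 ++ "┘"))) (120 - 5) " " ++ "│"]) := by
    funext lines row_start
    rw [← row_eq]
    simp [List.append_assoc]
  rw [← hbody]
  have h0 : (0 : Int) = ((0 : Nat) : Int) := rfl
  have hlen : PySem.List.len metrics = (metrics.length : Int) := by
    simp [PySem.List.len_eq]
  rw [hlen, h0, fold_chunks metrics metrics.length 0 _ (by omega)]
  simp
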